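-- pv_equiv track=rewrite | github.com/irantzu01/latxa_tokenizer_eval | scripts/simple_tokenization_evaluation.py | plot_token_length_distribution
-- ===== SOURCE A (Python) =====
-- def flatten(list_of_lists):
--     for sub in list_of_lists:
--         for item in sub:
--             yield item
--
-- def plot_token_length_distribution(latxa_tokens, dyn_tokens):
--     latxa_lengths = [len(tok) for tok in flatten(latxa_tokens)]
--     dyn_lengths = [len(tok) for tok in flatten(dyn_tokens)]
--
--     max_length = max(max(latxa_lengths), max(dyn_lengths))
--     bins = list(range(1, max_length + 1))
--
--     latxa_freq = [latxa_lengths.count(i) for i in bins]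
--     dyn_freq = [dyn_lengths.count(i) for i in bins]
--
--     return bins, latxa_freq, dyn_freq
-- ===== SOURCE B (Python) =====
-- def plot_token_length_distribution(latxa_tokens, dyn_tokens):
--     latxa_sorted = sorted(len(tok) for sub in latxa_tokens for tok in sub)
--     dyn_sorted = sorted(len(tok) for sub in dyn_tokens for tok in sub)
--
--     max_length = max(latxa_sorted[-1], dyn_sorted[-1])
--     bins = list(range(1, max_length + 1))
--
--     def sweep(s):
--         # s is sorted ascending: one linear two-pointer pass over s and the bins
--         freq = []
--         i = 0
--         for b in bins:
--             while i < len(s) and s[i] < b: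
--                 i += 1
--             c = 0
--             while i < len(s) and s[i] == b:
--                 c += 1
--                 i += 1
--             freq.append(c)
--         return freq
--
--     return bins, sweep(latxa_sorted), sweep(dyn_sorted)
-- ===== Notes on version B (the rewrite author's own statement) =====
-- stated objective: alternative
-- what changed: B sorts each flattened length list and produces both frequency rows with a single two-pointer merge sweep over the sorted lengths and the ascending bins (no per-bin scan and no hash table), where A calls list.count once per bin.
import Mathlib
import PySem

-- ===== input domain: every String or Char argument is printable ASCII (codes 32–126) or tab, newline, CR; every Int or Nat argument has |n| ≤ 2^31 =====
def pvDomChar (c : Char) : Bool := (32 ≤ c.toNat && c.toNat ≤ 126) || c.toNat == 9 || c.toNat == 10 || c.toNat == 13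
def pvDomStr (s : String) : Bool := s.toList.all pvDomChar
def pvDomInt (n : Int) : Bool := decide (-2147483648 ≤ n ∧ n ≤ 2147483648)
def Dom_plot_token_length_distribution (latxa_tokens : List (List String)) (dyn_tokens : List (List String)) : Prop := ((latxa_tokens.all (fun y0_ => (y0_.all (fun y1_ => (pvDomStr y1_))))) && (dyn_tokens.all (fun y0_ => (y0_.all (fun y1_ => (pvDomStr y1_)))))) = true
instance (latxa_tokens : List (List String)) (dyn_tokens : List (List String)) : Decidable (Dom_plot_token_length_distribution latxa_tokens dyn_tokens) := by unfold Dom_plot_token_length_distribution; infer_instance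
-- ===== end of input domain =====

-- B sorts each flattened length list and builds both frequency rows by a single two-pointer sweep over the sorted list and the bins, instead of A's per-bin list.count scans (return value only; neither mutates its arguments).


-- ===== PORT A =====
-- max(list) raises ValueError on an empty list; outside Pre_ the '.getD 0' is arbitrary (Pre_ excludes those inputs).
def plot_token_length_distribution (latxa_tokens : List (List String)) (dyn_tokens : List (List String)) : List (List Int) :=
  let latxa_lengths : List Int := (latxa_tokens.flatMap id).map (fun tok => PySem.Str.len tok)
  let dyn_lengths : List Int := (dyn_tokens.flatMap id).map (fun tok => PySem.Str.len tok)
  let max_length : Int := max ((PySem.List.max? latxa_lengths (fun y => y)).getD 0)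
                              ((PySem.List.max? dyn_lengths (fun y => y)).getD 0)
  let bins : List Int := PySem.List.pyRange 1 (max_length + 1) 1
  let latxa_freq : List Int := bins.map (fun i => (PySem.List.count latxa_lengths i : Int))
  let dyn_freq : List Int := bins.map (fun i => (PySem.List.count dyn_lengths i : Int))
  [bins, latxa_freq, dyn_freq]

-- ===== PORT B =====
-- Source B's inner 'while i < len(s) and s[i] < b: i += 1' / 'while … s[i] == b: c += 1; i += 1':
-- the index i into the immutable s is carried as the remaining suffix of s (i ↔ drop i), step for step.
def pvSkipLt (b : Int) : List Int → List Int
  | [] => []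
  | x :: t => if x < b then pvSkipLt b t else x :: t

def pvCountRun (b : Int) : List Int → Int × List Int
  | [] => (0, [])
  | x :: t => if x = b then
      let r := pvCountRun b t
      (r.1 + 1, r.2)
    else (0, x :: t)

-- Source B's sweep: for b in bins, skip s[i] < b, count the run s[i] == b, append the count.
def pvSweep (bins : List Int) (s : List Int) : List Int :=
  (bins.foldl (fun (st : List Int × List Int) b =>
      let rest := pvSkipLt b st.2
      let r := pvCountRun b rest
      (st.1 ++ [r.1], r.2)) ([], s)).1

-- s[-1] raises IndexError on an empty list; outside Pre_ the default 0 is arbitrary (Pre_ excludes those inputs).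
def plot_token_length_distribution_alt (latxa_tokens : List (List String)) (dyn_tokens : List (List String)) : List (List Int) :=
  let latxa_sorted : List Int :=
    PySem.List.sorted ((latxa_tokens.flatMap id).map (fun tok => PySem.Str.len tok)) (fun x => x) false
  let dyn_sorted : List Int :=
    PySem.List.sorted ((dyn_tokens.flatMap id).map (fun tok => PySem.Str.len tok)) (fun x => x) false
  let max_length : Int := max (PySem.List.pyGetD latxa_sorted (-1) 0) (PySem.List.pyGetD dyn_sorted (-1) 0)
  let bins : List Int := PySem.List.pyRange 1 (max_length + 1) 1
  [bins, pvSweep bins latxa_sorted, pvSweep bins dyn_sorted]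

-- ===== PRECONDITION & SPEC =====
-- Pre_ excludes inputs whose flattened token list is empty on either side: there Python A raises ValueError (max() of an empty sequence), and B raises IndexError.
def Pre_plot_token_length_distribution (latxa_tokens : List (List String)) (dyn_tokens : List (List String)) : Prop :=
  latxa_tokens.flatMap id ≠ [] ∧ dyn_tokens.flatMap id ≠ []
instance (latxa_tokens : List (List String)) (dyn_tokens : List (List String)) : Decidable (Pre_plot_token_length_distribution latxa_tokens dyn_tokens) := by unfold Pre_plot_token_length_distribution; infer_instance

def pvWitness_plot_token_length_distribution : List (List String) × List (List String) := ([["ab", "c"]], [["xyz"], []])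

def Spec_plot_token_length_distribution (latxa_tokens : List (List String)) (dyn_tokens : List (List String)) (out : List (List Int)) : Prop := out = plot_token_length_distribution_alt latxa_tokens dyn_tokens
instance (latxa_tokens : List (List String)) (dyn_tokens : List (List String)) (out : List (List Int)) : Decidable (Spec_plot_token_length_distribution latxa_tokens dyn_tokens out) := by unfold Spec_plot_token_length_distribution; infer_instance

-- ===== CLAIM (what is proved, stated in full; the proofs are below) =====
def Claim_equal_plot_token_length_distribution : Prop := ∀ (latxa_tokens : List (List String)) (dyn_tokens : List (List String)), Dom_plot_token_length_distribution latxa_tokens dyn_tokens → Pre_plot_token_length_distribution latxa_tokens dyn_tokens → Spec_plot_token_length_distribution latxa_tokens dyn_tokens (plot_token_length_distribution latxa_tokens dyn_tokens)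

-- ===== LEMMAS AND PROOFS =====

-- On a sorted (Pairwise ≤) list, skipping the elements < b leaves exactly the elements ≥ b.
theorem pvSkipLt_sorted (b : Int) (l : List Int) (hs : l.Pairwise (· ≤ ·)) :
    pvSkipLt b l = l.filter (fun x => b ≤ x) := by
  induction l with
  | nil => rfl
  | cons x t ih =>
    rcases List.pairwise_cons.mp hs with ⟨hx, ht⟩
    by_cases hlt : x < b
    · simp [pvSkipLt, hlt, show ¬ b ≤ x by omega, ih ht]
    · have hbx : b ≤ x := by omega
      have : t.filter (fun x => b ≤ x) = t := by
        apply List.filter_eq_self.mpr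
        intro y hy
        have := hx y hy
        simpa using by omega
      simp [pvSkipLt, hlt, hbx, this]

-- On a sorted list whose elements are all ≥ b, the counted run is the count of b and the rest the elements > b.
theorem pvCountRun_sorted (b : Int) (l : List Int) (hs : l.Pairwise (· ≤ ·))
    (hge : ∀ y ∈ l, b ≤ y) :
    pvCountRun b l = ((l.count b : Int), l.filter (fun x => b < x)) := by
  induction l with
  | nil => rfl
  | cons x t ih =>
    rcases List.pairwise_cons.mp hs with ⟨hx, ht⟩
    by_cases hxb : x = b
    · subst hxb
      have := ih ht (fun y hy => hx y hy)
      simp [pvCountRun, this]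
    · have hbx : b < x := by have := hge x (by simp); omega
      have hall : ∀ y ∈ x :: t, b < y := by
        intro y hy
        rcases List.mem_cons.mp hy with rfl | hy
        · exact hbx
        · have := hx y hy; omega
      have hcount : (x :: t).count b = 0 := by
        rw [List.count_eq_zero]
        intro hmem
        have := hall b hmem; omega
      have hfilter : (x :: t).filter (fun x => b < x) = x :: t := by
        apply List.filter_eq_self.mpr
        intro y hy
        simpa using hall y hy
      simp [pvCountRun, hxb, hcount, hfilter]

-- The two-pointer sweep over strictly increasing bins computes per-bin counts of the sorted base list.
theorem pvSweep_go (s0 : List Int) (hs0 : s0.Pairwise (· ≤ ·)) :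
    ∀ (bs : List Int) (p : Int) (acc : List Int), bs.Pairwise (· < ·) → (∀ b ∈ bs, p < b) →
      (bs.foldl (fun (st : List Int × List Int) b =>
          let rest := pvSkipLt b st.2
          let r := pvCountRun b rest
          (st.1 ++ [r.1], r.2)) (acc, s0.filter (fun x => p < x))).1
        = acc ++ bs.map (fun b => (s0.count b : Int)) := by
  intro bs
  induction bs with
  | nil => intro p acc _ _; simp
  | cons b bs ih =>
    intro p acc hpw hgt
    rcases List.pairwise_cons.mp hpw with ⟨hb, hbs⟩
    have hpb : p < b := hgt b (by simp)
    have hsf : (s0.filter (fun x => p < x)).Pairwise (· ≤ ·) := List.Pairwise.filter _ hs0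
    rw [List.foldl_cons]
    simp only
    rw [pvSkipLt_sorted b _ hsf]
    have hskip : (s0.filter (fun x => p < x)).filter (fun x => b ≤ x)
        = s0.filter (fun x => b ≤ x) := by
      rw [List.filter_filter]
      apply List.filter_congr
      intro y _
      by_cases h : b ≤ y
      · simp [h]; omega
      · simp [h]
    rw [hskip]
    have hge : ∀ y ∈ s0.filter (fun x => b ≤ x), b ≤ y := by
      intro y hy
      have := List.of_mem_filter hy
      simpa using this
    rw [pvCountRun_sorted b _ (List.Pairwise.filter _ hs0) hge]
    have hcount : (s0.filter (fun x => b ≤ x)).count b = s0.count b := by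
      rw [List.count_filter]
      simp
    have hrest : (s0.filter (fun x => b ≤ x)).filter (fun x => b < x)
        = s0.filter (fun x => b < x) := by
      rw [List.filter_filter]
      apply List.filter_congr
      intro y _
      by_cases h : b < y
      · simp [h]; omega
      · simp [h]
    simp only [hcount, hrest]
    rw [ih b (acc ++ [(s0.count b : Int)]) hbs hb]
    simp

-- Lengths are nonnegative, so filtering by (-1 < ·) is the identity.
theorem pvFilter_neg_one (l : List Int) (hnn : ∀ y ∈ l, 0 ≤ y) :
    l.filter (fun x => (-1 : Int) < x) = l := by
  apply List.filter_eq_self.mpr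
  intro y hy
  have := hnn y hy
  simpa using by omega

theorem pvLengths_nonneg (tokens : List (List String)) :
    ∀ y ∈ (tokens.flatMap id).map (fun tok => PySem.Str.len tok), 0 ≤ y := by
  intro y hy
  simp only [List.mem_map] at hy
  obtain ⟨tok, _, rfl⟩ := hy
  simp [PySem.Str.len]

-- pvSweep over bins 1..m equals A's per-bin counts of the unsorted lengths.
theorem pvSweep_eq_counts (l : List Int) (bins : List Int)
    (hnn : ∀ y ∈ l, 0 ≤ y) (hpw : bins.Pairwise (· < ·)) (hpos : ∀ b ∈ bins, 0 < b) :
    pvSweep bins (PySem.List.sorted l (fun x => x) false)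
      = bins.map (fun b => (PySem.List.count l b : Int)) := by
  set s := PySem.List.sorted l (fun x => x) false with hsdef
  have hperm : s.Perm l := PySem.List.sorted_perm l (fun x => x) false
  have hs : s.Pairwise (· ≤ ·) := PySem.List.sorted_pairwise l (fun x => x)
  have hnn' : ∀ y ∈ s, 0 ≤ y := fun y hy => hnn y (hperm.mem_iff.mp hy)
  unfold pvSweep
  have := pvSweep_go s hs bins (-1) [] hpw (fun b hb => by have := hpos b hb; omega)
  rw [pvFilter_neg_one s hnn'] at this
  rw [this]
  simp only [List.nil_append]
  apply List.map_congr_left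
  intro b _
  rw [PySem.List.count_eq, hperm.count_eq]

-- Last element of the sorted list = Python max of the unsorted list.
theorem pvLast_sorted_eq_max (l : List Int) (x : Int) (t : List Int) (hl : l = x :: t) :
    PySem.List.pyGetD (PySem.List.sorted l (fun y => y) false) (-1) 0
      = ((PySem.List.max? l (fun y => y)).getD 0) := by
  subst hl
  set s := PySem.List.sorted (x :: t) (fun y => y) false with hsdef
  have hperm : s.Perm (x :: t) := PySem.List.sorted_perm (x :: t) (fun y => y) false
  have hne : s ≠ [] := by
    intro h
    have := hperm.length_eq
    simp [h] at this
  rw [PySem.List.pyGetD_neg_one s 0 hne, PySem.List.max?_id_cons]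
  set M := t.foldl max x with hM
  have hMmem : M ∈ x :: t := by
    rcases PySem.List.foldl_max_mem t x with h | h
    · simp [hM, h]
    · simp [hM, List.mem_cons.mpr (Or.inr h)]
  have hMub : ∀ y ∈ x :: t, y ≤ M := by
    intro y hy
    rcases List.mem_cons.mp hy with rfl | hy
    · exact (PySem.List.le_foldl_max t y).1
    · exact (PySem.List.le_foldl_max t x).2 y hy
  have hlast_mem : s.getLast hne ∈ x :: t := hperm.mem_iff.mp (List.getLast_mem hne)
  have hs : s.Pairwise (· ≤ ·) := PySem.List.sorted_pairwise (x :: t) (fun y => y)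
  have hlast_ge : ∀ y ∈ s, y ≤ s.getLast hne := by
    intro y hy
    rcases List.mem_iff_getElem.mp hy with ⟨i, hi, rfl⟩
    rw [List.getLast_eq_getElem]
    rcases Nat.lt_or_ge i (s.length - 1) with hlt | hge
    · exact List.pairwise_iff_getElem.mp hs i (s.length - 1) hi (by omega) hlt
    · have hieq : i = s.length - 1 := by omega
      subst hieq
      exact le_rfl
  simp only [Option.getD_some]
  have h1 : s.getLast hne ≤ M := hMub _ hlast_mem
  have h2 : M ≤ s.getLast hne := hlast_ge M (hperm.mem_iff.mpr hMmem)
  omega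

-- ===== VERDICT (by name: the statement is the Claim_ definition above) =====
theorem plot_token_length_distribution_spec : Claim_equal_plot_token_length_distribution := by
  intro latxa dyn _ hpre
  unfold Spec_plot_token_length_distribution plot_token_length_distribution plot_token_length_distribution_alt
  obtain ⟨h1, h2⟩ := hpre
  obtain ⟨x1, t1, he1⟩ : ∃ x t, (latxa.flatMap id).map (fun tok => PySem.Str.len tok) = x :: t := by
    cases hl : latxa.flatMap id with
    | nil => exact absurd hl h1
    | cons a b => exact ⟨PySem.Str.len a, b.map (fun tok => PySem.Str.len tok), by simp⟩
  obtain ⟨x2, t2, he2⟩ : ∃ x t, (dyn.flatMap id).map (fun tok => PySem.Str.len tok) = x :: t := by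
    cases hl : dyn.flatMap id with
    | nil => exact absurd hl h2
    | cons a b => exact ⟨PySem.Str.len a, b.map (fun tok => PySem.Str.len tok), by simp⟩
  simp only
  rw [pvLast_sorted_eq_max _ x1 t1 he1, pvLast_sorted_eq_max _ x2 t2 he2]
  congr 1
  congr 1
  · exact (pvSweep_eq_counts _ _ (pvLengths_nonneg latxa) (PySem.List.pairwise_lt_pyRange_one _ _)
      (fun b hb => by have := PySem.List.mem_pyRange_one.mp hb; omega)).symm
  congr 1
  exact (pvSweep_eq_counts _ _ (pvLengths_nonneg dyn) (PySem.List.pairwise_lt_pyRange_one _ _)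
    (fun b hb => by have := PySem.List.mem_pyRange_one.mp hb; omega)).symm
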